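-- pv_equiv track=rewrite | github.com/Purnavu-12/Gram-Sahayak | services/scheme-matcher/external_api_integration.py | _deduplicate_schemes
-- ===== SOURCE A (Python) =====
-- from typing import Dict, List, Any, Optional
--
-- def _deduplicate_schemes(schemes: List[Dict[str, Any]]) -> List[Dict[str, Any]]:
--     """Remove duplicate schemes based on scheme_id"""
--     seen = {}
--     for scheme in schemes:
--         scheme_id = scheme.get("scheme_id")
--         if scheme_id:
--             # Keep the most recently updated version
--             if scheme_id not in seen:
--                 seen[scheme_id] = scheme
--             else:
--                 existing_updated = seen[scheme_id].get("last_updated", "")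
--                 new_updated = scheme.get("last_updated", "")
--                 if new_updated > existing_updated:
--                     seen[scheme_id] = scheme
--
--     return list(seen.values())
-- ===== SOURCE B (Python) =====
-- def _deduplicate_schemes(schemes):
--     """Remove duplicate schemes based on scheme_id"""
--     # collect: group schemes by id in first-appearance order
--     groups = {}
--     for scheme in schemes:
--         scheme_id = scheme.get("scheme_id")
--         if scheme_id:
--             groups.setdefault(scheme_id, []).append(scheme)
--     # reduce: per group, take the latest-updated (max keeps the earliest on ties)
--     return [max(group, key=lambda s: s.get("last_updated", ""))
--             for group in groups.values()]
-- ===== Notes on version B (the rewrite author's own statement) =====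
-- stated objective: alternative
-- what changed: Replaces the online compare-and-replace over a dict of representatives by a collect-then-reduce decomposition: first group schemes by id into ordered lists, then pick each group's representative with max(key=last_updated), which keeps the earliest maximal element exactly like A's strict '>' replacement.
import Mathlib
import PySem

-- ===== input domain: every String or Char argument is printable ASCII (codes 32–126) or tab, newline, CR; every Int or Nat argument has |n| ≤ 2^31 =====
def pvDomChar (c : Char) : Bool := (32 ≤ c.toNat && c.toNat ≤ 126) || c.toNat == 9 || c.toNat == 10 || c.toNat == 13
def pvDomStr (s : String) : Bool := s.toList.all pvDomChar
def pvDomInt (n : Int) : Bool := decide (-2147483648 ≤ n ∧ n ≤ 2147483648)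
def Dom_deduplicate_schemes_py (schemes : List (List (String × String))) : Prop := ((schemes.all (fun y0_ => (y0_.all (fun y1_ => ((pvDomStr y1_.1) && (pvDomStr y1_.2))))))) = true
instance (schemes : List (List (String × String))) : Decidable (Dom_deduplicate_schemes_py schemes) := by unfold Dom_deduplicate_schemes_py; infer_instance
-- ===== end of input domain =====

-- B replaces A's online compare-and-replace by a collect-then-reduce decomposition
-- (group by id, then take each group's first maximal last_updated); same cost, alternative structure.

-- shared dict-lookup helpers for a scheme (dict[str,str] as insertion-order assoc list, first match)
def pvSchemeGet? (s : List (String × String)) (k : String) : Option String :=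
  (PySem.Dict.mk s).get? k
def pvSchemeGetD (s : List (String × String)) (k dflt : String) : String :=
  (PySem.Dict.mk s).getD k dflt

-- ===== PORT A =====
def dedupStepA (seen : PySem.Dict String (List (String × String))) (scheme : List (String × String)) :
    PySem.Dict String (List (String × String)) :=
  match pvSchemeGet? scheme "scheme_id" with
  | none => seen
  | some scheme_id =>
    if scheme_id = "" then seen
    else if seen.contains scheme_id = false then seen.insert scheme_id scheme
    else
      let existing_updated := pvSchemeGetD (seen.getD scheme_id []) "last_updated" ""
      let new_updated := pvSchemeGetD scheme "last_updated" ""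
      if existing_updated < new_updated then seen.insert scheme_id scheme else seen

def deduplicate_schemes_py (schemes : List (List (String × String))) : List (List (String × String)) :=
  (schemes.foldl dedupStepA PySem.Dict.empty).values

-- ===== PORT B =====
def dedupStepB (groups : PySem.Dict String (List (List (String × String)))) (scheme : List (String × String)) :
    PySem.Dict String (List (List (String × String))) :=
  match pvSchemeGet? scheme "scheme_id" with
  | none => groups
  | some scheme_id =>
    if scheme_id = "" then groups
    else groups.modify scheme_id [] (· ++ [scheme])

def deduplicate_schemes_py_alt (schemes : List (List (String × String))) : List (List (String × String)) :=
  let groups := schemes.foldl dedupStepB PySem.Dict.empty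
  groups.values.map (fun group =>
    (PySem.List.max? group (fun s => pvSchemeGetD s "last_updated" "")).getD [])

-- ===== PRECONDITION & SPEC =====
def Spec_deduplicate_schemes_py (schemes : List (List (String × String))) (out : List (List (String × String))) : Prop := out = deduplicate_schemes_py_alt schemes
instance (schemes : List (List (String × String))) (out : List (List (String × String))) : Decidable (Spec_deduplicate_schemes_py schemes out) := by unfold Spec_deduplicate_schemes_py; infer_instance

-- ===== CLAIM (what is proved, stated in full; the proofs are below) =====
def Claim_equal_deduplicate_schemes_py : Prop := ∀ (schemes : List (List (String × String))), Dom_deduplicate_schemes_py schemes → Spec_deduplicate_schemes_py schemes (deduplicate_schemes_py schemes)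

-- ===== LEMMAS AND PROOFS =====

-- abbreviation used only by the proofs
def pvKey (s : List (String × String)) : String := pvSchemeGetD s "last_updated" ""

-- running max over one appended element is one step of A's compare-and-replace
lemma max?_append_singleton (g : List (List (String × String))) (s : List (String × String)) :
    PySem.List.max? (g ++ [s]) pvKey =
      match PySem.List.max? g pvKey with
      | none => some s
      | some m => if pvKey m < pvKey s then some s else some m := by
  unfold PySem.List.max?
  rw [List.foldl_append]
  simp only [List.foldl_cons, List.foldl_nil]
  split <;> rename_i h <;> rw [h]

-- the loop invariant: A's seen and B's groups keep the same keys, and A's entry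
-- at each key is the first maximal element of B's group there
lemma fold_invariant (schemes : List (List (String × String)))
    (seen : PySem.Dict String (List (String × String)))
    (groups : PySem.Dict String (List (List (String × String))))
    (hk : groups.keys = seen.keys) (hnd : seen.keys.Nodup)
    (hv : ∀ k, seen.get? k = PySem.List.max? (groups.getD k []) pvKey) :
    (schemes.foldl dedupStepB groups).keys = (schemes.foldl dedupStepA seen).keys ∧
    (schemes.foldl dedupStepA seen).keys.Nodup ∧
    ∀ k, (schemes.foldl dedupStepA seen).get? k =
      PySem.List.max? ((schemes.foldl dedupStepB groups).getD k []) pvKey := by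
  induction schemes generalizing seen groups with
  | nil => exact ⟨hk, hnd, hv⟩
  | cons s rest ih =>
    simp only [List.foldl_cons]
    apply ih
    · -- keys preserved by one step
      unfold dedupStepA dedupStepB
      cases hsid : pvSchemeGet? s "scheme_id" with
      | none => exact hk
      | some sid =>
        by_cases hemp : sid = ""
        · simp [hemp, hk]
        · simp only [hemp, if_false]
          have hcg : groups.contains sid = seen.contains sid := by
            simp [PySem.Dict.contains_eq_decide_mem_keys, hk]
          by_cases hc : seen.contains sid = false
          · rw [if_pos hc, PySem.Dict.modify,
              PySem.Dict.keys_insert_of_not_contains _ _ (by rw [hcg]; exact hc),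
              PySem.Dict.keys_insert_of_not_contains _ _ hc, hk]
          · rw [if_neg hc, PySem.Dict.modify,
              PySem.Dict.keys_insert_of_contains _ _
                (by rw [hcg]; exact (by revert hc; cases seen.contains sid <;> simp))]
            split
            · rw [PySem.Dict.keys_insert_of_contains _ _ ((by revert hc; cases seen.contains sid <;> simp)), hk]
            · exact hk
    · -- nodup preserved by one step
      unfold dedupStepA
      cases pvSchemeGet? s "scheme_id" with
      | none => exact hnd
      | some sid =>
        dsimp only []
        split
        · exact hnd
        · split
          · exact PySem.Dict.nodup_keys_insert _ _ _ hnd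
          · split
            · exact PySem.Dict.nodup_keys_insert _ _ _ hnd
            · exact hnd
    · -- value relation preserved by one step
      intro k
      unfold dedupStepA dedupStepB
      cases hsid : pvSchemeGet? s "scheme_id" with
      | none => exact hv k
      | some sid =>
        by_cases hemp : sid = ""
        · simp only [hemp, if_true]; exact hv k
        · simp only [hemp, if_false, PySem.Dict.modify]
          by_cases hks : k = sid
          · subst hks
            rw [PySem.Dict.getD_insert_self, max?_append_singleton]
            by_cases hc : seen.contains k = false
            · have hnone : seen.get? k = none := by
                rw [PySem.Dict.contains_eq_isSome_get?] at hc
                cases h : seen.get? k with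
                | none => rfl
                | some v => rw [h] at hc; simp at hc
              rw [if_pos hc, PySem.Dict.get?_insert_self]
              rw [← hv k, hnone]
            · rw [if_neg hc]
              have hc' : seen.contains k = true := (by revert hc; cases seen.contains k <;> simp)
              rw [PySem.Dict.contains_eq_isSome_get?] at hc'
              obtain ⟨m, hm⟩ := Option.isSome_iff_exists.mp hc'
              have hmax : PySem.List.max? (groups.getD k []) pvKey = some m := by
                rw [← hv k, hm]
              rw [hmax]
              have hgd : seen.getD k [] = m := PySem.Dict.getD_of_get?_eq_some _ _ hm
              simp only [hgd]
              by_cases hlt : pvSchemeGetD m "last_updated" "" < pvSchemeGetD s "last_updated" ""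
              · rw [if_pos hlt, PySem.Dict.get?_insert_self,
                  if_pos (show pvKey m < pvKey s from hlt)]
              · rw [if_neg hlt, if_neg (show ¬ pvKey m < pvKey s from hlt), hm]
          · rw [PySem.Dict.getD_insert_of_ne _ _ _ hks]
            by_cases hc : seen.contains sid = false
            · rw [if_pos hc, PySem.Dict.get?_insert_of_ne _ _ hks]; exact hv k
            · rw [if_neg hc]
              split
              · rw [PySem.Dict.get?_insert_of_ne _ _ hks]; exact hv k
              · exact hv k

-- ===== VERDICT (by name: the statement is the Claim_ definition above) =====
theorem deduplicate_schemes_py_spec : Claim_equal_deduplicate_schemes_py := by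
  intro schemes _
  unfold Spec_deduplicate_schemes_py deduplicate_schemes_py deduplicate_schemes_py_alt
  dsimp only []
  obtain ⟨hk, hnd, hv⟩ := fold_invariant schemes PySem.Dict.empty PySem.Dict.empty
    (by simp [PySem.Dict.keys_empty]) (by simp [PySem.Dict.keys_empty])
    (fun k => by simp [PySem.Dict.get?_empty, PySem.List.max?, PySem.Dict.getD_empty])
  set seen := schemes.foldl dedupStepA PySem.Dict.empty
  set groups := schemes.foldl dedupStepB PySem.Dict.empty
  have hndg : groups.keys.Nodup := hk ▸ hnd
  rw [PySem.Dict.values_eq_map_keys seen hnd [],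
    PySem.Dict.values_eq_map_keys groups hndg [], List.map_map, hk]
  apply List.map_congr_left
  intro k _
  simp only [Function.comp]
  rw [PySem.Dict.getD_eq_get?_getD, hv k]
  rfl
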